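-- pv_equiv track=rewrite | github.com/secrett2633/replit_algorithm | 프로그래머스/lv3/64064. 불량 사용자/불량 사용자.py | solution
-- ===== SOURCE A (Python) =====
-- def solution(user_id, banned_id):
--     answer = []
--     from collections import deque
--     cnt = [[0] * len(banned_id) for _ in range(len(user_id))]
--     def check(users, banned):
--         if len(users) != len(banned): return False
--         for i in range(len(users)):
--             if users[i] != banned[i] and banned[i] != "*": return False
--         return True
--     for i, user in enumerate(user_id):
--         for j, ban in enumerate(banned_id):
--             if check(user, ban):
--                 cnt[i][j] += 1
--     q = deque([[0, [0] * len(user_id)]])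
--     while q:
--         j, visited = q.popleft()
--         if j == len(banned_id):
--             if visited not in answer:
--                 answer.append(visited)
--             continue
--         for i in range(len(user_id)):
--             if cnt[i][j] and not visited[i]:
--                 visited[i] = 1
--                 q.append([j + 1, visited[::]])
--                 visited[i] = 0
--     return len(answer)
-- ===== SOURCE B (Python) =====
-- def solution(user_id, banned_id):
--     def fits(u, b):
--         return len(u) == len(b) and all(bc == '*' or uc == bc for uc, bc in zip(u, b))
--     n = len(user_id)
--     matches = [[i for i in range(n) if fits(user_id[i], b)] for b in banned_id]
--     results = set()
--     def dfs(j, mask):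
--         if j == len(banned_id):
--             results.add(mask)
--             return
--         for i in matches[j]:
--             if not (mask >> i) & 1:
--                 dfs(j + 1, mask | (1 << i))
--     dfs(0, 0)
--     return len(results)
-- ===== Notes on version B (the rewrite author's own statement) =====
-- stated objective: faster
-- what changed: Replaces the deque BFS over (level, copied 0/1 visited lists) with linear-scan dedup of answer lists by recursive backtracking over precomputed per-pattern match lists, tracking used users as a bitmask and deduplicating final selections in a hash set of masks.
import Mathlib
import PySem

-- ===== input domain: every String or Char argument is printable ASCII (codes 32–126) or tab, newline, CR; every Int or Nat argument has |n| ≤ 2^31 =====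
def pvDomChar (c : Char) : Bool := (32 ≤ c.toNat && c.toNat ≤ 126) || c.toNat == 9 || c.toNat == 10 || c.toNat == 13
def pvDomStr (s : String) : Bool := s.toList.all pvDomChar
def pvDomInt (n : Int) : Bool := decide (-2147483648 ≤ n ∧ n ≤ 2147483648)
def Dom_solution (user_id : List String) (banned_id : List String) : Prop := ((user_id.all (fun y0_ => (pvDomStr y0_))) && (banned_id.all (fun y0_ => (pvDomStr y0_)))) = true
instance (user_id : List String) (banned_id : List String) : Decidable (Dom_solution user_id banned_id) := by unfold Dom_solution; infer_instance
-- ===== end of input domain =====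

-- B replaces A's deque BFS over copied 0/1 visited lists (dedup by list scan of the answer list)
-- with recursive backtracking over precomputed per-pattern match lists, a used-user bitmask, and a set of masks.

-- ===== PORT A =====

-- check(users, banned): per-index loop with early return ('*' wildcard in banned)
def checkGo : List Char → List Char → Bool
  | u :: us, b :: bs => if u != b && b != '*' then false else checkGo us bs
  | _, _ => true

def checkA (users banned : String) : Bool :=
  if users.toList.length ≠ banned.toList.length then false else checkGo users.toList banned.toList

-- cnt[i][j] = 1 iff check(user_id[i], banned_id[j]) (built as the double loop sets it)
def cntA (user_id banned_id : List String) : List (List Int) :=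
  user_id.map (fun user => banned_id.map (fun ban => if checkA user ban then (1 : Int) else 0))

-- the inner 'for i in range(len(user_id))' body of the BFS: the visited-copies pushed for level j
def childrenA (cnt : List (List Int)) (j : Nat) (visited : List Nat) : List (List Nat) :=
  (List.range cnt.length).filterMap (fun i =>
    if ((cnt.getD i []).getD j 0 != 0) && (visited.getD i 0 == 0) then some (visited.set i 1) else none)

-- the 'while q' loop; queue entries carry r = len(banned_id) - j (the levels still to fill)
def bfsA (cnt : List (List Int)) (B : Nat) : List (Nat × List Nat) → List (List Nat) → List (List Nat)
  | [], answer => answer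
  | (r, visited) :: rest, answer =>
    if r = 0 then
      bfsA cnt B rest (if visited ∈ answer then answer else answer ++ [visited])
    else
      bfsA cnt B (rest ++ (childrenA cnt (B - r) visited).map (fun v => (r - 1, v))) answer
termination_by q _ => (q.map (fun p => (cnt.length + 1) ^ p.1)).sum
decreasing_by
  · simp only [List.map_cons, List.sum_cons]
    exact Nat.lt_add_of_pos_left (pow_pos (by omega) _)
  · simp only [List.map_cons, List.sum_cons, List.map_append, List.sum_append, List.map_map]
    rename_i hr
    have hlen : (childrenA cnt (B - r) visited).length ≤ cnt.length := by
      unfold childrenA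
      exact le_trans (List.length_filterMap_le _ _) (by simp)
    have hsum : (List.map ((fun p => (cnt.length + 1) ^ p.1) ∘ fun v => (r - 1, v))
        (childrenA cnt (B - r) visited)).sum
        = (childrenA cnt (B - r) visited).length * (cnt.length + 1) ^ (r - 1) := by
      induction childrenA cnt (B - r) visited with
      | nil => simp
      | cons x xs ih => simp only [List.map_cons, List.sum_cons, List.length_cons, ih,
          Function.comp]; ring
    rw [hsum]
    have hpow : (cnt.length + 1) ^ r = (cnt.length + 1) * (cnt.length + 1) ^ (r - 1) := by
      conv_lhs => rw [show r = (r - 1) + 1 from (Nat.succ_pred_eq_of_pos (by omega)).symm]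
      rw [pow_succ, mul_comm]
    have key : (childrenA cnt (B - r) visited).length * (cnt.length + 1) ^ (r - 1)
        < (cnt.length + 1) ^ r := by
      rw [hpow]
      exact lt_of_le_of_lt (Nat.mul_le_mul_right _ hlen)
        (Nat.mul_lt_mul_of_lt_of_le (by omega) (le_refl _) (pow_pos (by omega) _))
    linarith [key]

def solution (user_id : List String) (banned_id : List String) : Int :=
  let cnt := cntA user_id banned_id
  ((bfsA cnt banned_id.length
      [(banned_id.length, List.replicate user_id.length 0)] []).length : Int)

-- ===== PORT B =====

-- fits(u, b): equal length and each banned char '*' or equal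
def fitsB (u b : String) : Bool :=
  u.toList.length == b.toList.length
    && (u.toList.zip b.toList).all (fun p => p.2 == '*' || p.1 == p.2)

-- matches[j] = the user indices fitting banned_id[j]
def matchesB (user_id banned_id : List String) : List (List Nat) :=
  banned_id.map (fun b => (List.range user_id.length).filter (fun i => fitsB (user_id.getD i "") b))

-- dfs(j, mask): j is the position in the matches list; results threaded through
mutual
def dfsB : List (List Nat) → Nat → PySem.Set Nat → PySem.Set Nat
  | [], mask, res => PySem.Set.add res mask
  | m :: rest, mask, res => dfsLoopB rest m mask res
  termination_by ms _ _ => (ms.length + 1, 0)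
def dfsLoopB : List (List Nat) → List Nat → Nat → PySem.Set Nat → PySem.Set Nat
  | _, [], _, res => res
  | rest, i :: is, mask, res =>
      dfsLoopB rest is mask (if mask.testBit i then res else dfsB rest (mask ||| (1 <<< i)) res)
  termination_by rest m _ _ => (rest.length + 1, m.length + 1)
end

def solution_alt (user_id : List String) (banned_id : List String) : Int :=
  ((dfsB (matchesB user_id banned_id) 0 PySem.Set.empty).length : Int)

-- ===== PRECONDITION & SPEC =====
def Spec_solution (user_id : List String) (banned_id : List String) (out : Int) : Prop := out = solution_alt user_id banned_id
instance (user_id : List String) (banned_id : List String) (out : Int) : Decidable (Spec_solution user_id banned_id out) := by unfold Spec_solution; infer_instance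

-- ===== CLAIM (what is proved, stated in full; the proofs are below) =====
def Claim_equal_solution : Prop := ∀ (user_id : List String) (banned_id : List String), Dom_solution user_id banned_id → Spec_solution user_id banned_id (solution user_id banned_id)

-- ===== LEMMAS AND PROOFS =====

-- the tree of completed visited-lists reachable from v through the remaining match lists
def leavesH : List (List Nat) → List Nat → List (List Nat)
  | [] => fun v => [v]
  | m :: rest => fun v =>
      (m.filter (fun i => v.getD i 0 == 0)).flatMap (fun i => leavesH rest (v.set i 1))

-- the same tree, on bitmask states
def leavesM : List (List Nat) → Nat → List Nat
  | [] => fun mask => [mask]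
  | m :: rest => fun mask =>
      (m.filter (fun i => !(mask.testBit i))).flatMap (fun i => leavesM rest (mask ||| (1 <<< i)))

-- little-endian mask of a 0/1 list
def toMask : List Nat → Nat
  | [] => 0
  | b :: rest => b + 2 * toMask rest

theorem checkGo_eq (us bs : List Char) (h : us.length = bs.length) :
    checkGo us bs = (us.zip bs).all (fun p => p.2 == '*' || p.1 == p.2) := by
  induction us generalizing bs with
  | nil => cases bs with
    | nil => simp [checkGo]
    | cons b bs => simp at h
  | cons u us ih => cases bs with
    | nil => simp at h
    | cons b bs =>
      simp only [List.length_cons, Nat.add_right_cancel_iff] at h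
      simp only [checkGo, List.zip_cons_cons, List.all_cons, ih _ h]
      by_cases h1 : u = b <;> by_cases h2 : b = '*' <;> simp [h1, h2]

theorem check_eq_fits (u b : String) : checkA u b = fitsB u b := by
  unfold checkA fitsB
  by_cases h : u.toList.length = b.toList.length
  · simp [h, checkGo_eq u.toList b.toList h]
  · rw [if_pos h, show (u.toList.length == b.toList.length) = false from
      beq_eq_false_iff_ne.mpr h, Bool.false_and]

theorem filterMap_ite_some (l : List Nat) (p : Nat → Bool) (f : Nat → List Nat) :
    l.filterMap (fun i => if p i then some (f i) else none) = (l.filter p).map f := by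
  induction l with
  | nil => rfl
  | cons x xs ih =>
    by_cases h : p x <;> simp [h, ih]

theorem children_eq (user banned : List String) (j : Nat) (v : List Nat) :
    childrenA (cntA user banned) j v
      = (((matchesB user banned).getD j []).filter (fun i => v.getD i 0 == 0)).map
          (fun i => v.set i 1) := by
  have hn : (cntA user banned).length = user.length := by simp [cntA]
  by_cases hj : j < banned.length
  · have hmlen : j < (matchesB user banned).length := by simpa [matchesB] using hj
    have hms : (matchesB user banned).getD j []
        = (List.range user.length).filter (fun i => fitsB (user.getD i "") (banned[j]'hj)) := by
      rw [List.getD_eq_getElem _ _ hmlen]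
      unfold matchesB
      rw [List.getElem_map]
    have hcond : ∀ i ∈ List.range user.length,
        (if (((cntA user banned).getD i []).getD j 0 != 0) && (v.getD i 0 == 0)
          then some (v.set i 1) else none)
        = (if (fitsB (user.getD i "") (banned[j]'hj)) && (v.getD i 0 == 0)
          then some (v.set i 1) else none) := by
      intro i hi
      have hi' : i < user.length := List.mem_range.mp hi
      have hcnt : (cntA user banned).getD i []
          = banned.map (fun ban => if checkA (user.getD i "") ban then (1 : Int) else 0) := by
        rw [List.getD_eq_getElem _ _ (by omega)]
        unfold cntA
        rw [List.getElem_map, List.getD_eq_getElem _ _ hi']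
      have hrow : ((cntA user banned).getD i []).getD j 0
          = if checkA (user.getD i "") (banned[j]'hj) then (1 : Int) else 0 := by
        rw [hcnt, List.getD_eq_getElem _ _ (by simpa using hj), List.getElem_map]
      rw [hrow, check_eq_fits]
      by_cases hf : fitsB (user.getD i "") (banned[j]'hj) <;> simp
    unfold childrenA
    rw [hn, List.filterMap_congr hcond,
      filterMap_ite_some _ (fun i => (fitsB (user.getD i "") (banned[j]'hj)) && (v.getD i 0 == 0)),
      hms, List.filter_filter]
    refine congrArg (List.map _) (List.filter_congr ?_)
    intro i _
    rw [Bool.and_comm]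
  · have h1 : (matchesB user banned).getD j [] = [] :=
      List.getD_eq_default _ _ (by simpa [matchesB] using hj)
    rw [h1]
    simp only [List.filter_nil, List.map_nil]
    unfold childrenA
    apply List.filterMap_eq_nil_iff.mpr
    intro i hi
    rw [hn] at hi
    have hi' : i < user.length := List.mem_range.mp hi
    have hcnt : (cntA user banned).getD i []
        = banned.map (fun ban => if checkA (user.getD i "") ban then (1 : Int) else 0) := by
      rw [List.getD_eq_getElem _ _ (by rw [hn]; omega)]
      unfold cntA
      rw [List.getElem_map, List.getD_eq_getElem _ _ hi']
    have hrow : ((cntA user banned).getD i []).getD j 0 = 0 := by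
      rw [hcnt]
      exact List.getD_eq_default _ _ (by simpa using hj)
    simp only [List.getD_eq_getElem?_getD] at hrow
    simp [hrow]

theorem foldl_add_spec (L : List Nat) (res : List Nat) (h : res.Nodup) :
    (L.foldl PySem.Set.add res).Nodup ∧
      (L.foldl PySem.Set.add res).toFinset = res.toFinset ∪ L.toFinset := by
  induction L generalizing res with
  | nil => simp [h]
  | cons x xs ih =>
    simp only [List.foldl_cons]
    have hnd : (PySem.Set.add res x).Nodup := PySem.Set.nodup_add _ _ h
    obtain ⟨h1, h2⟩ := ih (PySem.Set.add res x) hnd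
    refine ⟨h1, ?_⟩
    rw [h2, PySem.Set.add_eq_ite]
    split_ifs with hx
    · ext y
      simp only [List.toFinset_cons, Finset.mem_union, Finset.mem_insert, List.mem_toFinset]
      constructor
      · tauto
      · rintro (h | h | h) <;> simp_all
    · ext y
      simp only [List.toFinset_append, List.toFinset_cons, Finset.mem_union,
        Finset.mem_insert, List.mem_toFinset, List.toFinset_nil]
      tauto

mutual
theorem dfsB_eq : ∀ (ms : List (List Nat)) (mask : Nat) (res : PySem.Set Nat),
    dfsB ms mask res = (leavesM ms mask).foldl PySem.Set.add res
  | [], mask, res => by simp [dfsB, leavesM]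
  | m :: rest, mask, res => by
    rw [dfsB, dfsLoopB_eq rest m mask res]
    rfl
  termination_by ms _ _ => (ms.length + 1, 0)
theorem dfsLoopB_eq : ∀ (rest : List (List Nat)) (m : List Nat) (mask : Nat)
    (res : PySem.Set Nat),
    dfsLoopB rest m mask res =
      ((m.filter (fun i => !(mask.testBit i))).flatMap
        (fun i => leavesM rest (mask ||| (1 <<< i)))).foldl PySem.Set.add res
  | rest, [], mask, res => by simp [dfsLoopB]
  | rest, i :: is, mask, res => by
    rw [dfsLoopB, dfsLoopB_eq rest is mask]
    by_cases h : mask.testBit i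
    · simp [h]
    · simp only [h, List.filter_cons, Bool.not_false, if_true]
      rw [dfsB_eq rest (mask ||| (1 <<< i)) res]
      simp [List.foldl_append]
  termination_by rest m _ _ => (rest.length + 1, m.length + 1)
end

theorem bfs_inv (user banned : List String) (q : List (Nat × List Nat))
    (answer : List (List Nat))
    :
    (∀ p ∈ q, p.1 ≤ banned.length) → answer.Nodup →
    (bfsA (cntA user banned) banned.length q answer).Nodup ∧
      (bfsA (cntA user banned) banned.length q answer).toFinset =
        answer.toFinset ∪
          (q.flatMap (fun p =>
            leavesH ((matchesB user banned).drop (banned.length - p.1)) p.2)).toFinset := by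
  have hmsl : (matchesB user banned).length = banned.length := by simp [matchesB]
  fun_induction bfsA (cntA user banned) banned.length q answer with
  | case1 answer =>
    intro _ ha
    simp [ha]
  | case2 visited rest answer ih =>
    intro hq ha
    have hdrop : (matchesB user banned).drop (banned.length - 0) = ([] : List (List Nat)) :=
      List.drop_eq_nil_of_le (by omega)
    have ha' : (if visited ∈ answer then answer else answer ++ [visited]).Nodup := by
      split_ifs with hv
      · exact ha
      · exact List.Nodup.append ha (List.nodup_singleton _) (by simpa using hv)
    obtain ⟨h1, h2⟩ := ih (fun p hp => hq p (by simp [hp])) ha'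
    simp only [dite_eq_ite] at h1 h2
    refine ⟨h1, ?_⟩
    rw [h2]
    have hif : (if visited ∈ answer then answer else answer ++ [visited]).toFinset
        = insert visited answer.toFinset := by
      split_ifs with hv
      · exact (Finset.insert_eq_self.mpr (List.mem_toFinset.mpr hv)).symm
      · ext y
        simp only [List.toFinset_append, List.toFinset_cons, List.toFinset_nil,
          Finset.mem_union, Finset.mem_insert, List.mem_toFinset,
          Finset.notMem_empty, or_false]
        tauto
    rw [hif]
    simp only [List.flatMap_cons, hdrop, leavesH]
    ext y
    simp only [Finset.mem_union, Finset.mem_insert, List.mem_toFinset, List.mem_append,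
      List.mem_cons]
    tauto
  | case3 r visited rest answer hr ih =>
    intro hq ha
    have hrB : r ≤ banned.length := hq (r, visited) (by simp)
    have hq' : ∀ p ∈ rest ++ (childrenA (cntA user banned) (banned.length - r) visited).map
        (fun v => (r - 1, v)), p.1 ≤ banned.length := by
      intro p hp
      rcases List.mem_append.mp hp with hp | hp
      · exact hq p (by simp [hp])
      · obtain ⟨v', _, rfl⟩ := List.mem_map.mp hp
        simp; omega
    obtain ⟨h1, h2⟩ := ih hq' ha
    refine ⟨h1, ?_⟩
    rw [h2]
    have hBr : banned.length - r < (matchesB user banned).length := by omega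
    have hkey : ((childrenA (cntA user banned) (banned.length - r) visited).map
          (fun v => (r - 1, v))).flatMap
          (fun p => leavesH ((matchesB user banned).drop (banned.length - p.1)) p.2)
        = leavesH ((matchesB user banned).drop (banned.length - r)) visited := by
      rw [children_eq, List.getD_eq_getElem _ _ hBr, List.drop_eq_getElem_cons hBr]
      simp only [leavesH, List.flatMap_map]
      rw [show banned.length - (r - 1) = banned.length - r + 1 from by omega]
    rw [List.flatMap_append, hkey]
    ext y
    simp only [Finset.mem_union, List.mem_toFinset, List.flatMap_cons, List.mem_append]
    tauto

theorem toMask_testBit (v : List Nat) (h : ∀ x ∈ v, x ≤ 1) (i : Nat) :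
    (toMask v).testBit i = !(v.getD i 0 == 0) := by
  induction v generalizing i with
  | nil => simp [toMask]
  | cons b rest ih =>
    have hb : b ≤ 1 := h b (by simp)
    have hrest : ∀ x ∈ rest, x ≤ 1 := fun x hx => h x (by simp [hx])
    cases i with
    | zero =>
      rw [Nat.testBit_zero]
      have : (b + 2 * toMask rest) % 2 = b := by omega
      simp only [toMask, this, List.getD_cons_zero]
      interval_cases b <;> simp
    | succ i =>
      rw [Nat.testBit_add_one]
      have : (b + 2 * toMask rest) / 2 = toMask rest := by omega
      simp only [toMask, this, List.getD_cons_succ, ih hrest]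

theorem toMask_set (v : List Nat) (i : Nat) (hi : i < v.length) (h : ∀ x ∈ v, x ≤ 1) :
    toMask (v.set i 1) = toMask v ||| (1 <<< i) := by
  apply Nat.eq_of_testBit_eq
  intro k
  have h01 : ∀ x ∈ v.set i 1, x ≤ 1 := by
    intro x hx
    rcases List.mem_or_eq_of_mem_set hx with hx | hx
    · exact h x hx
    · omega
  rw [toMask_testBit _ h01, Nat.testBit_or, toMask_testBit _ h, Nat.one_shiftLeft,
    Nat.testBit_two_pow]
  have hget : (v.set i 1).getD k 0 = if i = k then 1 else v.getD k 0 := by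
    rw [List.getD_eq_getElem?_getD, List.getD_eq_getElem?_getD, List.getElem?_set]
    split_ifs with h1
    · rfl
    · rfl
  rw [hget]
  by_cases hik : i = k <;> simp [hik]

theorem toMask_inj (v : List Nat) : ∀ (w : List Nat), v.length = w.length →
    (∀ x ∈ v, x ≤ 1) → (∀ x ∈ w, x ≤ 1) → toMask v = toMask w → v = w := by
  induction v with
  | nil => intro w hl _ _ _; cases w with
    | nil => rfl
    | cons b bs => simp at hl
  | cons a as ih =>
    intro w hl h1 h2 hm
    cases w with
    | nil => simp at hl
    | cons b bs =>
      have ha : a ≤ 1 := h1 a (by simp)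
      have hb : b ≤ 1 := h2 b (by simp)
      simp only [toMask] at hm
      have hab : a = b := by omega
      have hms : toMask as = toMask bs := by omega
      have := ih bs (by simpa using hl) (fun x hx => h1 x (by simp [hx]))
        (fun x hx => h2 x (by simp [hx])) hms
      rw [hab, this]

theorem toMask_replicate (n : Nat) : toMask (List.replicate n 0) = 0 := by
  induction n with
  | zero => rfl
  | succ n ih => simp [List.replicate_succ, toMask, ih]

theorem leavesH_mem (ms : List (List Nat)) : ∀ (v u : List Nat), (∀ x ∈ v, x ≤ 1) →
    u ∈ leavesH ms v → u.length = v.length ∧ ∀ x ∈ u, x ≤ 1 := by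
  induction ms with
  | nil => intro v u h hu; simp [leavesH] at hu; subst hu; exact ⟨rfl, h⟩
  | cons m rest ih =>
    intro v u h hu
    simp only [leavesH, List.mem_flatMap, List.mem_filter] at hu
    obtain ⟨i, ⟨hi, _⟩, hu⟩ := hu
    have h01 : ∀ x ∈ v.set i 1, x ≤ 1 := by
      intro x hx
      rcases List.mem_or_eq_of_mem_set hx with hx | hx
      · exact h x hx
      · omega
    obtain ⟨hl, hx⟩ := ih (v.set i 1) u h01 hu
    exact ⟨by simpa using hl, hx⟩

theorem map_leavesH (ms : List (List Nat)) : ∀ (v : List Nat),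
    (∀ m ∈ ms, ∀ i ∈ m, i < v.length) → (∀ x ∈ v, x ≤ 1) →
    (leavesH ms v).map toMask = leavesM ms (toMask v) := by
  induction ms with
  | nil => intro v _ _; simp [leavesH, leavesM]
  | cons m rest ih =>
    intro v hb h01
    simp only [leavesH, leavesM]
    rw [List.map_flatMap]
    have hfil : m.filter (fun i => !(toMask v).testBit i)
        = m.filter (fun i => v.getD i 0 == 0) := by
      apply List.filter_congr
      intro i _
      rw [toMask_testBit v h01 i, Bool.not_not]
    rw [hfil]
    apply List.flatMap_congr
    intro i hi
    have him : i ∈ m := List.mem_of_mem_filter hi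
    have hiv : i < v.length := hb m (by simp) i him
    rw [ih (v.set i 1)
      (by intro m' hm' i' hi'; rw [List.length_set]; exact hb m' (by simp [hm']) i' hi')
      (by intro x hx
          rcases List.mem_or_eq_of_mem_set hx with hx | hx
          · exact h01 x hx
          · omega),
      toMask_set v i hiv h01]

theorem matchesB_bound (user banned : List String) :
    ∀ m ∈ matchesB user banned, ∀ i ∈ m, i < user.length := by
  intro m hm i hi
  unfold matchesB at hm
  obtain ⟨b, _, rfl⟩ := List.mem_map.mp hm
  have := (List.mem_filter.mp hi).1
  simpa using this

theorem solution_count (user banned : List String) :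
    solution user banned
      = ((leavesH (matchesB user banned) (List.replicate user.length 0)).toFinset.card : Int) := by
  show ((bfsA (cntA user banned) banned.length
      [(banned.length, List.replicate user.length 0)] []).length : Int) = _
  obtain ⟨hnd, hset⟩ := bfs_inv user banned
    [(banned.length, List.replicate user.length 0)] [] (by simp) (by simp)
  rw [← List.toFinset_card_of_nodup hnd, hset]
  simp

theorem solution_alt_count (user banned : List String) :
    solution_alt user banned
      = ((leavesM (matchesB user banned) 0).toFinset.card : Int) := by
  unfold solution_alt
  rw [dfsB_eq]
  obtain ⟨hnd, hset⟩ := foldl_add_spec (leavesM (matchesB user banned) 0) PySem.Set.empty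
    (by simp [PySem.Set.empty])
  rw [← List.toFinset_card_of_nodup hnd, hset]
  simp [PySem.Set.empty]

-- ===== VERDICT (by name: the statement is the Claim_ definition above) =====
theorem solution_spec : Claim_equal_solution := by
  intro user banned _
  unfold Spec_solution
  rw [solution_count, solution_alt_count]
  have h01 : ∀ x ∈ List.replicate user.length (0 : Nat), x ≤ 1 := by
    intro x hx
    rw [List.eq_of_mem_replicate hx]
    omega
  have hmap : (leavesH (matchesB user banned) (List.replicate user.length 0)).map toMask
      = leavesM (matchesB user banned) 0 := by
    rw [map_leavesH _ _ (by
        intro m hm i hi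
        rw [List.length_replicate]
        exact matchesB_bound user banned m hm i hi) h01,
      toMask_replicate]
  rw [← hmap]
  have himg : ((leavesH (matchesB user banned) (List.replicate user.length 0)).map
      toMask).toFinset
      = (leavesH (matchesB user banned) (List.replicate user.length 0)).toFinset.image
          toMask := by
    ext x
    simp [List.mem_map, Finset.mem_image]
  rw [himg, Finset.card_image_of_injOn]
  intro u1 h1 u2 h2 heq
  simp only [Finset.mem_coe, List.mem_toFinset] at h1 h2
  obtain ⟨l1, o1⟩ := leavesH_mem (matchesB user banned) _ u1 h01 h1
  obtain ⟨l2, o2⟩ := leavesH_mem (matchesB user banned) _ u2 h01 h2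
  exact toMask_inj u1 u2 (l1.trans l2.symm) o1 o2 heq
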